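-- pv_equiv track=rewrite | github.com/jiggyjiggy/Algorithm-practice | programers/코테 고득점 kit/sort/모의고사.py | solution
-- ===== SOURCE A (Python) =====
-- def solution(answers):
--     s1 = [1, 2, 3, 4, 5]
--     s2 = [2, 1, 2, 3, 2, 4, 2, 5]
--     s3 = [3, 3, 1, 1, 2, 2, 4, 4, 5, 5]
--
--     score = [0, 0, 0, 0]
--     result = []
--
--     for idx, ans in enumerate(answers):
--         if s1[idx % len(s1)] == ans:
--             score[1] += 1
--         if s2[idx % len(s2)] == ans:
--             score[2] += 1
--         if s3[idx % len(s3)] == ans: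
--             score[3] += 1
--
--     for idx, s in enumerate(score):
--         if s == max(score):
--             result.append(idx)
--
--     return result
-- ===== SOURCE B (Python) =====
-- def solution(answers):
--     s1 = [1, 2, 3, 4, 5]
--     s2 = [2, 1, 2, 3, 2, 4, 2, 5]
--     s3 = [3, 3, 1, 1, 2, 2, 4, 4, 5, 5]
--     # The three patterns are jointly periodic with period lcm(5, 8, 10) = 40, so a
--     # frequency table keyed by (position mod 40, answer) determines every match count:
--     # one pass over answers builds the table, then each pattern's score is read off
--     # with 40 table lookups, without ever comparing pattern entries to answers.
--     freq = {}
--     for i, a in enumerate(answers):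
--         k = (i % 40, a)
--         freq[k] = freq.get(k, 0) + 1
--     score = [0] + [sum(freq.get((r, p[r % len(p)]), 0) for r in range(40))
--                    for p in (s1, s2, s3)]
--     m = max(score)
--     return [i for i, s in enumerate(score) if s == m]
-- ===== Notes on version B (the rewrite author's own statement) =====
-- stated objective: alternative
-- what changed: Replaces A's per-answer comparison against the three patterns with a frequency dictionary keyed by (position mod 40, answer) - 40 being the patterns' joint period - built in one comparison-free pass, after which each pattern's score is read off with 40 table lookups instead of being accumulated per element.
import Mathlib
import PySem

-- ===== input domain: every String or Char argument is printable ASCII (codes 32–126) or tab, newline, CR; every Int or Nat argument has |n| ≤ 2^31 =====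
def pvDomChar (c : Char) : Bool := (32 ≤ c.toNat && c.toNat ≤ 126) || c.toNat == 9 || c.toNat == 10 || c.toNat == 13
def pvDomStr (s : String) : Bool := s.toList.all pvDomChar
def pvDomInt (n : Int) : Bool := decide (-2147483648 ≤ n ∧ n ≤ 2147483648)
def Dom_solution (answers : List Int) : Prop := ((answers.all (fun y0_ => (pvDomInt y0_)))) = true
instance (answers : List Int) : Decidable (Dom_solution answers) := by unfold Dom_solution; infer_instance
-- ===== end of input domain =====

-- B replaces A's per-answer comparisons against the three patterns by a frequency table
-- keyed by (position mod 40, answer) — the patterns' joint period — built in one pass and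
-- then read off with 40 lookups per pattern (alternative algorithm; same asymptotic cost).

-- ===== PORT A =====
def solution (answers : List Int) : List Int :=
  let s1 : List Int := [1, 2, 3, 4, 5]
  let s2 : List Int := [2, 1, 2, 3, 2, 4, 2, 5]
  let s3 : List Int := [3, 3, 1, 1, 2, 2, 4, 4, 5, 5]
  let score :=
    (PySem.List.enumerate answers).foldl (fun score ia =>
      let score := if PySem.List.pyGetD s1 (PySem.Int.mod ia.1 (s1.length : Int)) 0 == ia.2
                   then score.set 1 (PySem.List.pyGetD score 1 0 + 1) else score
      let score := if PySem.List.pyGetD s2 (PySem.Int.mod ia.1 (s2.length : Int)) 0 == ia.2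
                   then score.set 2 (PySem.List.pyGetD score 2 0 + 1) else score
      let score := if PySem.List.pyGetD s3 (PySem.Int.mod ia.1 (s3.length : Int)) 0 == ia.2
                   then score.set 3 (PySem.List.pyGetD score 3 0 + 1) else score
      score) ([0, 0, 0, 0] : List Int)
  (PySem.List.enumerate score).foldl (fun result is =>
      if is.2 == (PySem.List.max? score (fun y => y)).getD 0 then result ++ [is.1] else result) []

-- ===== PORT B =====
def solution_alt (answers : List Int) : List Int :=
  let s1 : List Int := [1, 2, 3, 4, 5]
  let s2 : List Int := [2, 1, 2, 3, 2, 4, 2, 5]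
  let s3 : List Int := [3, 3, 1, 1, 2, 2, 4, 4, 5, 5]
  -- freq[(i % 40, a)] += 1, one pass over enumerate(answers)
  let freq := (PySem.List.enumerate answers).foldl
      (fun d ia => d.modify (PySem.Int.mod ia.1 40, ia.2) 0 (· + 1))
      (PySem.Dict.empty : PySem.Dict (Int × Int) Int)
  -- each pattern's score: 40 table lookups
  let score := 0 :: ([s1, s2, s3].map (fun p =>
      ((PySem.List.pyRange 0 40 1).map (fun r =>
        freq.getD (r, PySem.List.pyGetD p (PySem.Int.mod r (p.length : Int)) 0) 0)).sum))
  let m := (PySem.List.max? score (fun y => y)).getD 0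
  ((PySem.List.enumerate score).filter (fun is => is.2 == m)).map (·.1)

-- ===== PRECONDITION & SPEC =====
def Spec_solution (answers : List Int) (out : List Int) : Prop := out = solution_alt answers
instance (answers : List Int) (out : List Int) : Decidable (Spec_solution answers out) := by unfold Spec_solution; infer_instance

-- ===== CLAIM (what is proved, stated in full; the proofs are below) =====
def Claim_equal_solution : Prop := ∀ (answers : List Int), Dom_solution answers → Spec_solution answers (solution answers)

-- ===== LEMMAS AND PROOFS =====

-- number of enumerate pairs matching pattern p (the value A accumulates per slot)
def cntP (p : List Int) (l : List (Int × Int)) : Int :=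
  (l.countP (fun ia => PySem.List.pyGetD p (PySem.Int.mod ia.1 (p.length : Int)) 0 == ia.2) : Int)

-- the pattern value at position r
def fP (p : List Int) (r : Int) : Int := PySem.List.pyGetD p (PySem.Int.mod r (p.length : Int)) 0

-- reading then writing one slot of the 4-slot score list
lemma bump1 (a b c d : Int) : ([a,b,c,d]:List Int).set 1 (PySem.List.pyGetD ([a,b,c,d]:List Int) 1 0 + 1) = [a, b + 1, c, d] := by
  simp [pysem]
lemma bump2 (a b c d : Int) : ([a,b,c,d]:List Int).set 2 (PySem.List.pyGetD ([a,b,c,d]:List Int) 2 0 + 1) = [a, b, c + 1, d] := by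
  simp [pysem]
lemma bump3 (a b c d : Int) : ([a,b,c,d]:List Int).set 3 (PySem.List.pyGetD ([a,b,c,d]:List Int) 3 0 + 1) = [a, b, c, d + 1] := by
  simp [pysem]

-- A's score loop computes, in each slot, the per-pattern match count
lemma scoreLoop :
    ∀ (l : List (Int × Int)) (a b c d : Int),
      l.foldl (fun score ia =>
        let score := if PySem.List.pyGetD ([1,2,3,4,5] : List Int) (PySem.Int.mod ia.1 ((([1,2,3,4,5] : List Int)).length : Int)) 0 == ia.2
                     then score.set 1 (PySem.List.pyGetD score 1 0 + 1) else score
        let score := if PySem.List.pyGetD ([2,1,2,3,2,4,2,5] : List Int) (PySem.Int.mod ia.1 ((([2,1,2,3,2,4,2,5] : List Int)).length : Int)) 0 == ia.2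
                     then score.set 2 (PySem.List.pyGetD score 2 0 + 1) else score
        let score := if PySem.List.pyGetD ([3,3,1,1,2,2,4,4,5,5] : List Int) (PySem.Int.mod ia.1 ((([3,3,1,1,2,2,4,4,5,5] : List Int)).length : Int)) 0 == ia.2
                     then score.set 3 (PySem.List.pyGetD score 3 0 + 1) else score
        score) ([a, b, c, d] : List Int)
      = [a, b + cntP [1,2,3,4,5] l, c + cntP [2,1,2,3,2,4,2,5] l, d + cntP [3,3,1,1,2,2,4,4,5,5] l] := by
  intro l
  induction l with
  | nil => intro a b c d; simp [cntP]
  | cons x t ih =>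
      intro a b c d
      simp only [List.foldl_cons]
      by_cases h1 : (PySem.List.pyGetD ([1,2,3,4,5] : List Int) (PySem.Int.mod x.1 ((([1,2,3,4,5] : List Int)).length : Int)) 0 == x.2) = true <;>
      by_cases h2 : (PySem.List.pyGetD ([2,1,2,3,2,4,2,5] : List Int) (PySem.Int.mod x.1 ((([2,1,2,3,2,4,2,5] : List Int)).length : Int)) 0 == x.2) = true <;>
      by_cases h3 : (PySem.List.pyGetD ([3,3,1,1,2,2,4,4,5,5] : List Int) (PySem.Int.mod x.1 ((([3,3,1,1,2,2,4,4,5,5] : List Int)).length : Int)) 0 == x.2) = true <;>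
      simp only [h1, h2, h3, if_true, if_false, Bool.false_eq_true, bump1, bump2, bump3, ih] <;>
      simp only [cntP, List.countP_cons, h1, h2, h3, List.cons.injEq, if_true, if_false,
        Bool.false_eq_true, and_true, true_and] <;>
      all_goals and_intros
      all_goals push_cast
      all_goals omega

-- folding with period 40 never changes the pattern value: (i % 40) % len p = i % len p
lemma fP_mod (p : List Int) (hL : 0 < (p.length : Int)) (hdvd : (p.length : Int) ∣ 40) (i : Int) :
    fP p (PySem.Int.mod i 40) = fP p i := by
  unfold fP
  rw [PySem.Int.mod_eq_emod_of_pos hL, PySem.Int.mod_eq_emod_of_pos (by omega : (0:Int) < 40),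
      PySem.Int.mod_eq_emod_of_pos hL, Int.emod_emod_of_dvd i hdvd]

-- exactly one residue r in range(40) carries the key (i % 40, a), and only if the pattern matches
lemma countP_range (p : List Int) (i a : Int) :
    ((PySem.List.pyRange 0 40 1).countP (fun r => (r, fP p r) == (PySem.Int.mod i 40, a)))
      = if fP p (PySem.Int.mod i 40) == a then 1 else 0 := by
  have h0 : 0 ≤ PySem.Int.mod i 40 := PySem.Int.mod_nonneg i (by omega)
  have h40 : PySem.Int.mod i 40 < 40 := PySem.Int.mod_lt i (by omega)
  by_cases h : fP p (PySem.Int.mod i 40) = a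
  · rw [if_pos (by simpa using h)]
    have hc : ((PySem.List.pyRange 0 40 1).countP (fun r => (r, fP p r) == (PySem.Int.mod i 40, a)))
        = (PySem.List.pyRange 0 40 1).count (PySem.Int.mod i 40) := by
      apply List.countP_congr
      intro r _
      simp only [beq_iff_eq, Prod.mk.injEq]
      constructor
      · rintro ⟨hr, _⟩; exact hr
      · rintro hr; exact ⟨hr, by rw [hr, h]⟩
    rw [hc]
    exact List.count_eq_one_of_mem (by decide) (PySem.List.mem_pyRange_one.mpr ⟨h0, h40⟩)
  · rw [if_neg (by simpa using h)]
    apply List.countP_eq_zero.mpr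
    intro r _
    simp only [beq_iff_eq, Prod.mk.injEq, not_and]
    intro hr; rw [hr]; simpa using h

-- the range-40 lookup sum over the key counts of l equals the match count of l
lemma countSum (p : List Int) (hL : 0 < (p.length : Int)) (hdvd : (p.length : Int) ∣ 40) :
    ∀ (l : List (Int × Int)),
      ((PySem.List.pyRange 0 40 1).map (fun r =>
          ((l.map (fun ia => (PySem.Int.mod ia.1 40, ia.2))).count (r, fP p r) : Int))).sum
        = cntP p l := by
  intro l
  induction l with
  | nil => simp [cntP]
  | cons x t ih =>
      have hstep : ∀ r : Int,
          (((((x :: t).map (fun ia => (PySem.Int.mod ia.1 40, ia.2))).count (r, fP p r)) : Int))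
            = (((t.map (fun ia => (PySem.Int.mod ia.1 40, ia.2))).count (r, fP p r)) : Int)
              + (if ((r, fP p r) == (PySem.Int.mod x.1 40, x.2)) then 1 else 0) := by
        intro r
        have hco : ∀ (u v : Int × Int), (u == v) = (v == u) := fun u v => by
          simp [eq_comm]
        simp only [List.map_cons, List.count_cons, hco]
        push_cast
        ring
      calc ((PySem.List.pyRange 0 40 1).map (fun r =>
              ((((x :: t).map (fun ia => (PySem.Int.mod ia.1 40, ia.2))).count (r, fP p r)) : Int))).sum
          = ((PySem.List.pyRange 0 40 1).map (fun r =>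
              (((t.map (fun ia => (PySem.Int.mod ia.1 40, ia.2))).count (r, fP p r)) : Int)
              + (if ((r, fP p r) == (PySem.Int.mod x.1 40, x.2)) then 1 else 0))).sum := by
            exact congrArg List.sum (List.map_congr_left (fun r _ => hstep r))
        _ = cntP p t + (if (fP p x.1 == x.2) then 1 else 0) := by
            rw [PySem.List.sum_map_add_int, ih, PySem.List.sum_map_ite_one_zero, countP_range p x.1 x.2,
                fP_mod p hL hdvd]
            push_cast
            split_ifs <;> ring
        _ = cntP p (x :: t) := by
            simp only [cntP, List.countP_cons]
            have : (PySem.List.pyGetD p (PySem.Int.mod x.1 (p.length : Int)) 0 == x.2) = (fP p x.1 == x.2) := rfl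
            rw [this]
            push_cast
            split_ifs <;> ring

-- B's per-pattern table read equals the match count
lemma tableRead (p : List Int) (hL : 0 < (p.length : Int)) (hdvd : (p.length : Int) ∣ 40)
    (answers : List Int) :
    ((PySem.List.pyRange 0 40 1).map (fun r =>
        ((PySem.List.enumerate answers).foldl
            (fun d ia => d.modify (PySem.Int.mod ia.1 40, ia.2) 0 (· + 1))
            (PySem.Dict.empty : PySem.Dict (Int × Int) Int)).getD
          (r, PySem.List.pyGetD p (PySem.Int.mod r (p.length : Int)) 0) 0)).sum
      = cntP p (PySem.List.enumerate answers) := by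
  have hfold :
      (List.foldl (fun d ia => PySem.Dict.modify d (PySem.Int.mod ia.1 40, ia.2) 0 (· + 1))
          (PySem.Dict.empty : PySem.Dict (Int × Int) Int) (PySem.List.enumerate answers))
        = (List.foldl (fun d x => PySem.Dict.modify d x 0 (· + 1))
            (PySem.Dict.empty : PySem.Dict (Int × Int) Int)
            ((PySem.List.enumerate answers).map (fun ia => (PySem.Int.mod ia.1 40, ia.2)))) :=
    (List.foldl_map (f := fun (ia : Int × Int) => ((PySem.Int.mod ia.1 40, ia.2) : Int × Int))
      (g := fun d x => PySem.Dict.modify d x 0 (· + 1))).symm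
  calc ((PySem.List.pyRange 0 40 1).map (fun r =>
          ((PySem.List.enumerate answers).foldl
              (fun d ia => d.modify (PySem.Int.mod ia.1 40, ia.2) 0 (· + 1))
              (PySem.Dict.empty : PySem.Dict (Int × Int) Int)).getD
            (r, PySem.List.pyGetD p (PySem.Int.mod r (p.length : Int)) 0) 0)).sum
      = ((PySem.List.pyRange 0 40 1).map (fun r =>
          ((((PySem.List.enumerate answers).map (fun ia => (PySem.Int.mod ia.1 40, ia.2))).count
              (r, fP p r)) : Int))).sum := by
        refine congrArg List.sum (List.map_congr_left (fun r _ => ?_))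
        rw [hfold, PySem.Dict.getD_foldl_modify_add_one]
        simp [pysem, fP]
    _ = cntP p (PySem.List.enumerate answers) := countSum p hL hdvd (PySem.List.enumerate answers)

-- ===== VERDICT (by name: the statement is the Claim_ definition above) =====
theorem solution_spec : Claim_equal_solution := by
  intro answers _
  unfold Spec_solution solution solution_alt
  dsimp only
  rw [scoreLoop]
  simp only [List.map_cons, List.map_nil]
  rw [tableRead [1,2,3,4,5] (by norm_num) (by norm_num),
      tableRead [2,1,2,3,2,4,2,5] (by norm_num) (by norm_num),
      tableRead [3,3,1,1,2,2,4,4,5,5] (by norm_num) (by norm_num)]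
  rw [PySem.List.foldl_append_if]
  simp only [List.nil_append, zero_add]
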